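-- pv_equiv track=rewrite | github.com/ChahelPaatur/Self-Modifying-Program-Synthesis-via-Online-Library-Evolution | models/abstraction_learner/solver.py | extract_border
-- ===== SOURCE A (Python) =====
-- from typing import List, Dict, Tuple, Set, Optional
--
-- Grid = List[List[int]]
--
-- def extract_border(grid: Grid, thickness: int = 1) -> Grid:
--     """Extract border of grid"""
--     if not grid or len(grid) < 2 * thickness or len(grid[0]) < 2 * thickness:
--         return grid
--
--     h, w = len(grid), len(grid[0])
--     result = [[0] * w for _ in range(h)]
--
--     # Top and bottom
--     for r in range(thickness):
--         for c in range(w):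
--             result[r][c] = grid[r][c]
--             result[h - 1 - r][c] = grid[h - 1 - r][c]
--
--     # Left and right
--     for r in range(h):
--         for c in range(thickness):
--             result[r][c] = grid[r][c]
--             result[r][w - 1 - c] = grid[r][w - 1 - c]
--
--     return result
-- ===== SOURCE B (Python) =====
-- def extract_border(grid, thickness=1):
--     """Extract border of grid"""
--     if not grid or len(grid) < 2 * thickness or len(grid[0]) < 2 * thickness:
--         return grid
--     h, w = len(grid), len(grid[0])
--     return [[grid[r][c] if (r < thickness or r >= h - thickness
--                             or c < thickness or c >= w - thickness) else 0
--              for c in range(w)]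
--             for r in range(h)]
-- ===== Notes on version B (the rewrite author's own statement) =====
-- stated objective: simpler
-- what changed: A zero-fills a buffer and then mutates it with two band-scoped double write loops (top/bottom rows, then left/right columns); B builds the result in one pass as a nested comprehension that decides per cell, with a border-band predicate, whether to copy grid[r][c] or emit 0.
import Mathlib
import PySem

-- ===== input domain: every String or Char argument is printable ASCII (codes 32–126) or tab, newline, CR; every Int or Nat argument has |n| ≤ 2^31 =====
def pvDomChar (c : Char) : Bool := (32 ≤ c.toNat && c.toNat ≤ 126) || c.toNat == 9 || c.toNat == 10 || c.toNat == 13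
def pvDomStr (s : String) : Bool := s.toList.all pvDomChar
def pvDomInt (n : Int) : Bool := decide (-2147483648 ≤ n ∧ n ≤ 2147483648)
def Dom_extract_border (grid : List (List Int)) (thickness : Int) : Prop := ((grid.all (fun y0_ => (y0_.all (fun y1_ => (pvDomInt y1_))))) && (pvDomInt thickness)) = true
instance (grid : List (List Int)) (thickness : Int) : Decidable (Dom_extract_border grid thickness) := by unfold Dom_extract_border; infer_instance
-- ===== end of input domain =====

-- B replaces A's zero-filled buffer mutated by two band-scoped write loops with a single
-- nested comprehension deciding per cell, via a border-band predicate, copy-or-zero (objective: simpler).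

-- ===== PORT A =====
-- result[r][c] = v : exact wherever A executes it (indices there are non-negative and in range)
def pvSet2 (res : List (List Int)) (r c : Int) (v : Int) : List (List Int) :=
  res.set r.toNat ((res.getD r.toNat []).set c.toNat v)

-- grid[r][c] : exact wherever the admitted inputs reach it (non-negative, in-range indices;
-- Pre_ excludes the inputs where Python would raise IndexError here)
def pvGet2 (g : List (List Int)) (r c : Int) : Int :=
  PySem.List.pyGetD (PySem.List.pyGetD g r []) c 0

def extract_border (grid : List (List Int)) (thickness : Int) : List (List Int) :=
  if grid = [] ∨ (grid.length : Int) < 2 * thickness ∨ ((grid.headD []).length : Int) < 2 * thickness then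
    grid
  else
    let h : Int := (grid.length : Int)
    let w : Int := ((grid.headD []).length : Int)
    let result := List.replicate grid.length (List.replicate (grid.headD []).length (0 : Int))
    -- Top and bottom
    let result := (PySem.List.pyRange 0 thickness 1).foldl (fun res r =>
      (PySem.List.pyRange 0 w 1).foldl (fun res c =>
        pvSet2 (pvSet2 res r c (pvGet2 grid r c)) (h - 1 - r) c (pvGet2 grid (h - 1 - r) c)) res) result
    -- Left and right
    let result := (PySem.List.pyRange 0 h 1).foldl (fun res r =>
      (PySem.List.pyRange 0 thickness 1).foldl (fun res c =>
        pvSet2 (pvSet2 res r c (pvGet2 grid r c)) r (w - 1 - c) (pvGet2 grid r (w - 1 - c))) res) result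
    result

-- ===== PORT B =====
def extract_border_alt (grid : List (List Int)) (thickness : Int) : List (List Int) :=
  if grid = [] ∨ (grid.length : Int) < 2 * thickness ∨ ((grid.headD []).length : Int) < 2 * thickness then
    grid
  else
    let h : Int := (grid.length : Int)
    let w : Int := ((grid.headD []).length : Int)
    (PySem.List.pyRange 0 h 1).map (fun r =>
      (PySem.List.pyRange 0 w 1).map (fun c =>
        if r < thickness ∨ r ≥ h - thickness ∨ c < thickness ∨ c ≥ w - thickness
        then pvGet2 grid r c else 0))

-- ===== PRECONDITION & SPEC =====
-- Pre_ excludes exactly the inputs where A raises IndexError: past the guard with positive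
-- thickness, every row must be at least as long as row 0 (B raises there as well).
def Pre_extract_border (grid : List (List Int)) (thickness : Int) : Prop :=
  (grid = [] ∨ (grid.length : Int) < 2 * thickness ∨ ((grid.headD []).length : Int) < 2 * thickness)
  ∨ thickness ≤ 0
  ∨ (∀ row ∈ grid, (grid.headD []).length ≤ row.length)
instance (grid : List (List Int)) (thickness : Int) : Decidable (Pre_extract_border grid thickness) := by unfold Pre_extract_border; infer_instance

def pvWitness_extract_border : List (List Int) × Int := ([[1, 2, 3], [4, 5, 6], [7, 8, 9]], 1)

def Spec_extract_border (grid : List (List Int)) (thickness : Int) (out : List (List Int)) : Prop := out = extract_border_alt grid thickness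
instance (grid : List (List Int)) (thickness : Int) (out : List (List Int)) : Decidable (Spec_extract_border grid thickness out) := by unfold Spec_extract_border; infer_instance

-- ===== CLAIM (what is proved, stated in full; the proofs are below) =====
def Claim_equal_extract_border : Prop := ∀ (grid : List (List Int)) (thickness : Int), Dom_extract_border grid thickness → Pre_extract_border grid thickness → Spec_extract_border grid thickness (extract_border grid thickness)

-- ===== LEMMAS AND PROOFS =====

-- entry (i, j) of a 2-D list, default 0
def pvPeek (res : List (List Int)) (i j : Nat) : Int := (res.getD i []).getD j 0

def pvStep (grid : List (List Int)) (res : List (List Int)) (p : Int × Int) : List (List Int) :=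
  pvSet2 res p.1 p.2 (pvGet2 grid p.1 p.2)

-- invariant carried through the write folds: dimensions H × W, and each cell holds grid's value
-- where P holds and 0 elsewhere
def pvInv (grid : List (List Int)) (H W : Nat) (P : Nat → Nat → Prop) (res : List (List Int)) : Prop :=
  res.length = H ∧ (∀ i, (res.getD i []).length = if i < H then W else 0) ∧
  (∀ i j, i < H → j < W →
    (P i j → pvPeek res i j = pvPeek grid i j) ∧ (¬ P i j → pvPeek res i j = 0))

theorem pvInv_congr {grid : List (List Int)} {H W : Nat} {P Q : Nat → Nat → Prop} {res : List (List Int)}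
    (h : pvInv grid H W P res) (hPQ : ∀ i j, i < H → j < W → (P i j ↔ Q i j)) :
    pvInv grid H W Q res := by
  refine ⟨h.1, h.2.1, fun i j hi hj => ?_⟩
  obtain ⟨h1, h2⟩ := h.2.2 i j hi hj
  exact ⟨fun hq => h1 ((hPQ i j hi hj).2 hq), fun hq => h2 (fun p => hq ((hPQ i j hi hj).1 p))⟩

theorem pvSet2_row {res : List (List Int)} {r c : Int} {v : Int} (hrlt : r.toNat < res.length)
    (i : Nat) :
    (pvSet2 res r c v).getD i [] =
      if i = r.toNat then (res.getD r.toNat []).set c.toNat v else res.getD i [] := by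
  by_cases hir : i = r.toNat
  · subst hir
    simp [pvSet2, List.getD_eq_getElem?_getD, List.getElem?_set_self hrlt]
  · simp [pvSet2, List.getD_eq_getElem?_getD,
      List.getElem?_set_ne (fun h : r.toNat = i => hir h.symm), hir]

theorem pvPeek_set2 {res : List (List Int)} {r c : Int} {v : Int} (hrlt : r.toNat < res.length)
    (i j : Nat) :
    pvPeek (pvSet2 res r c v) i j =
      if i = r.toNat ∧ j = c.toNat ∧ c.toNat < (res.getD r.toNat []).length then v
      else pvPeek res i j := by
  simp only [pvPeek, pvSet2_row hrlt, List.getD_eq_getElem?_getD]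
  by_cases hir : i = r.toNat
  · simp only [hir]
    by_cases hjc : j = c.toNat
    · by_cases hcl : c.toNat < (res[r.toNat]?.getD (α := List Int) []).length
      · simp [hjc, hcl]
      · simp [hjc, hcl]
    · simp [List.getElem?_set_ne (fun h : c.toNat = j => hjc h.symm), hjc]
  · simp [hir]

theorem pvInv_set2 {grid : List (List Int)} {H W : Nat} {P : Nat → Nat → Prop} {res : List (List Int)}
    (h : pvInv grid H W P res) (r c : Int) (hr0 : 0 ≤ r) (hrH : r < (H : Int))
    (hc0 : 0 ≤ c) (hcW : c < (W : Int)) :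
    pvInv grid H W (fun i j => P i j ∨ (i = r.toNat ∧ j = c.toNat))
      (pvSet2 res r c (pvGet2 grid r c)) := by
  obtain ⟨hlen, hrow, hval⟩ := h
  have hrH' : r.toNat < H := by omega
  have hcW' : c.toNat < W := by omega
  have hrlt : r.toNat < res.length := by omega
  have hrowlen : (res.getD r.toNat []).length = W := by rw [hrow]; simp [hrH']
  have hgv : pvGet2 grid r c = pvPeek grid r.toNat c.toNat := by
    simp [pvGet2, pvPeek, PySem.List.pyGetD_of_nonneg _ _ hr0, PySem.List.pyGetD_of_nonneg _ _ hc0]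
  refine ⟨by simp [pvSet2, hlen], ?_, ?_⟩
  · intro i
    rw [pvSet2_row hrlt]
    by_cases hir : i = r.toNat
    · rw [if_pos hir, List.length_set, hrowlen, hir, if_pos hrH']
    · rw [if_neg hir]; exact hrow i
  · intro i j hi hj
    rw [pvPeek_set2 hrlt]
    by_cases hit : i = r.toNat ∧ j = c.toNat
    · obtain ⟨hi1, hi2⟩ := hit
      subst hi1; subst hi2
      rw [if_pos ⟨rfl, rfl, by omega⟩, hgv]
      exact ⟨fun _ => rfl, fun hn => absurd (Or.inr ⟨rfl, rfl⟩) hn⟩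
    · rw [if_neg (fun h => hit ⟨h.1, h.2.1⟩)]
      obtain ⟨h1, h2⟩ := hval i j hi hj
      exact ⟨fun hq => by rcases hq with hq | hq; exacts [h1 hq, absurd hq hit],
        fun hq => h2 (fun p => hq (Or.inl p))⟩

theorem pvInv_foldl {grid : List (List Int)} {H W : Nat} (ws : List (Int × Int))
    {P : Nat → Nat → Prop} {res : List (List Int)}
    (h : pvInv grid H W P res)
    (hb : ∀ p ∈ ws, 0 ≤ p.1 ∧ p.1 < (H : Int) ∧ 0 ≤ p.2 ∧ p.2 < (W : Int)) :
    pvInv grid H W (fun i j => P i j ∨ ∃ p ∈ ws, p.1.toNat = i ∧ p.2.toNat = j)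
      (ws.foldl (pvStep grid) res) := by
  induction ws generalizing P res with
  | nil => exact pvInv_congr h (by simp)
  | cons p ws ih =>
    obtain ⟨h1, h2, h3, h4⟩ := hb p (by simp)
    have hstep := pvInv_set2 h p.1 p.2 h1 h2 h3 h4
    have hrec := ih (P := fun i j => P i j ∨ (i = p.1.toNat ∧ j = p.2.toNat))
      (res := pvSet2 res p.1 p.2 (pvGet2 grid p.1 p.2)) hstep
      (fun q hq => hb q (by simp [hq]))
    rw [List.foldl_cons]
    refine pvInv_congr hrec (fun i j hi hj => ?_)
    constructor
    · rintro ((hp | ⟨hr, hc⟩) | ⟨q, hq, hqi⟩)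
      · exact Or.inl hp
      · exact Or.inr ⟨p, by simp, hr.symm, hc.symm⟩
      · exact Or.inr ⟨q, by simp [hq], hqi⟩
    · rintro (hp | ⟨q, hq, hqi, hqj⟩)
      · exact Or.inl (Or.inl hp)
      · rcases List.mem_cons.mp hq with rfl | hq
        · exact Or.inl (Or.inr ⟨hqi.symm, hqj.symm⟩)
        · exact Or.inr ⟨q, hq, hqi, hqj⟩

-- A's two write phases as one flat list of written coordinates
def pvWrites (h w t : Int) : List (Int × Int) :=
  ((PySem.List.pyRange 0 t 1).flatMap (fun r =>
    (PySem.List.pyRange 0 w 1).flatMap (fun c => [(r, c), (h - 1 - r, c)])))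
  ++ ((PySem.List.pyRange 0 h 1).flatMap (fun r =>
    (PySem.List.pyRange 0 t 1).flatMap (fun c => [(r, c), (r, w - 1 - c)])))

theorem pvBody_eq_foldl_writes (grid : List (List Int)) (h w t : Int) (res : List (List Int)) :
    ((PySem.List.pyRange 0 h 1).foldl (fun res r =>
      (PySem.List.pyRange 0 t 1).foldl (fun res c =>
        pvSet2 (pvSet2 res r c (pvGet2 grid r c)) r (w - 1 - c) (pvGet2 grid r (w - 1 - c))) res)
      ((PySem.List.pyRange 0 t 1).foldl (fun res r =>
        (PySem.List.pyRange 0 w 1).foldl (fun res c =>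
          pvSet2 (pvSet2 res r c (pvGet2 grid r c)) (h - 1 - r) c (pvGet2 grid (h - 1 - r) c)) res) res))
    = (pvWrites h w t).foldl (pvStep grid) res := by
  rw [pvWrites, List.foldl_append, List.foldl_flatMap, List.foldl_flatMap]
  simp only [List.foldl_flatMap, List.foldl_cons, List.foldl_nil, pvStep]

theorem pvMem_writes {h w t : Int} {i j : Nat}
    (hh : 0 < h) (hw : 0 ≤ w) (h2t : 2 * t ≤ h) (w2t : 2 * t ≤ w)
    (hi : (i : Int) < h) (hj : (j : Int) < w) :
    ((∃ p ∈ pvWrites h w t, p.1.toNat = i ∧ p.2.toNat = j) ↔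
      ((i : Int) < t ∨ (i : Int) ≥ h - t ∨ (j : Int) < t ∨ (j : Int) ≥ w - t)) := by
  simp only [pvWrites, List.mem_append, List.mem_flatMap, PySem.List.mem_pyRange_one,
    List.mem_cons, List.mem_singleton]
  constructor
  · rintro ⟨p, (⟨r, ⟨hr0, hrt⟩, c, ⟨hc0, hcw⟩, (rfl | (rfl | h0))⟩ |
      ⟨r, ⟨hr0, hrh⟩, c, ⟨hc0, hct⟩, (rfl | (rfl | h0))⟩), hpi, hpj⟩ <;>
      first
        | exact absurd h0 (List.not_mem_nil)
        | (dsimp at hpi hpj; omega)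
  · rintro (hcase | hcase | hcase | hcase)
    · refine ⟨((i : Int), (j : Int)), Or.inl ⟨(i:Int), ⟨?_, ?_⟩, (j:Int), ⟨?_, ?_⟩, Or.inl ?_⟩, ?_, ?_⟩ <;>
        try simp only [Prod.mk.injEq, and_true, true_and]
      all_goals try dsimp only
      all_goals omega
    · refine ⟨((i : Int), (j : Int)), Or.inl ⟨h - 1 - (i:Int), ⟨?_, ?_⟩, (j:Int), ⟨?_, ?_⟩,
        Or.inr (Or.inl ?_)⟩, ?_, ?_⟩ <;> try simp only [Prod.mk.injEq, and_true, true_and]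
      all_goals try dsimp only
      all_goals omega
    · refine ⟨((i : Int), (j : Int)), Or.inr ⟨(i:Int), ⟨?_, ?_⟩, (j:Int), ⟨?_, ?_⟩, Or.inl ?_⟩, ?_, ?_⟩ <;>
        try simp only [Prod.mk.injEq, and_true, true_and]
      all_goals try dsimp only
      all_goals omega
    · refine ⟨((i : Int), (j : Int)), Or.inr ⟨(i:Int), ⟨?_, ?_⟩, w - 1 - (j:Int), ⟨?_, ?_⟩,
        Or.inr (Or.inl ?_)⟩, ?_, ?_⟩ <;> try simp only [Prod.mk.injEq, and_true, true_and]
      all_goals try dsimp only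
      all_goals omega

theorem pvWrites_bounds {h w t : Int} (h2t : 2 * t ≤ h) (w2t : 2 * t ≤ w) :
    ∀ p ∈ pvWrites h w t, 0 ≤ p.1 ∧ p.1 < h ∧ 0 ≤ p.2 ∧ p.2 < w := by
  intro p hp
  simp only [pvWrites, List.mem_append, List.mem_flatMap, PySem.List.mem_pyRange_one,
    List.mem_cons, List.mem_singleton] at hp
  rcases hp with ⟨r, ⟨hr0, hrt⟩, c, ⟨hc0, hcw⟩, (rfl | (rfl | h0))⟩ |
    ⟨r, ⟨hr0, hrh⟩, c, ⟨hc0, hct⟩, (rfl | (rfl | h0))⟩ <;>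
    first
      | exact absurd h0 (List.not_mem_nil)
      | (dsimp; omega)

-- ===== VERDICT (by name: the statement is the Claim_ definition above) =====
theorem extract_border_spec : Claim_equal_extract_border := by
  intro grid thickness _ hpre
  unfold Spec_extract_border extract_border extract_border_alt
  by_cases hguard : grid = [] ∨ (grid.length : Int) < 2 * thickness ∨ ((grid.headD []).length : Int) < 2 * thickness
  · rw [if_pos hguard, if_pos hguard]
  · rw [if_neg hguard, if_neg hguard]
    dsimp only
    have hne : grid ≠ [] := fun h => hguard (Or.inl h)
    have h2t : 2 * thickness ≤ (grid.length : Int) := le_of_not_gt (fun h => hguard (Or.inr (Or.inl h)))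
    have w2t : 2 * thickness ≤ ((grid.headD []).length : Int) := le_of_not_gt (fun h => hguard (Or.inr (Or.inr h)))
    set H := grid.length with hH
    set W := (grid.headD []).length with hW
    have hW' : W = (grid.head?.getD []).length := by rw [hW, List.headD_eq_head?_getD]
    have hH0 : 0 < H := by cases grid with | nil => exact absurd rfl hne | cons _ _ => simp [hH]
    have hinit : pvInv grid H W (fun _ _ => False)
        (List.replicate H (List.replicate W (0 : Int))) := by
      refine ⟨by simp, ?_, ?_⟩
      · intro i
        by_cases hi : i < H <;>
          simp [List.getD_eq_getElem?_getD, hi]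
      · intro i j hi hj
        refine ⟨fun hfalse => absurd hfalse (by simp), fun _ => ?_⟩
        simp [pvPeek, List.getD_eq_getElem?_getD, hi, hj]
    rw [pvBody_eq_foldl_writes]
    have hfin := pvInv_foldl (pvWrites (H : Int) (W : Int) thickness) hinit
      (pvWrites_bounds (by exact_mod_cast h2t) (by exact_mod_cast w2t))
    obtain ⟨hlen, hrow, hval⟩ := hfin
    apply List.ext_getElem
    · simp [hlen, PySem.List.length_pyRange_one]
    · intro i hi1 hi2
      have hiH : i < H := by rwa [hlen] at hi1
      have hrowi : ((pvWrites (H : Int) (W : Int) thickness).foldl (pvStep grid)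
          (List.replicate H (List.replicate W (0 : Int))))[i].length
          = W := by
        have := hrow i
        rwa [List.getD_eq_getElem?_getD, List.getElem?_eq_getElem hi1, Option.getD_some,
          if_pos hiH] at this
      apply List.ext_getElem
      · simp [hrowi, PySem.List.length_pyRange_one, PySem.List.getElem_pyRange_one]
      · intro j hj1 hj2
        have hjW : j < W := by omega
        have hA : ((pvWrites (H : Int) (W : Int) thickness).foldl (pvStep grid)
            (List.replicate H (List.replicate W (0 : Int))))[i][j]
            = pvPeek ((pvWrites (H : Int) (W : Int) thickness).foldl (pvStep grid)
              (List.replicate H (List.replicate W (0 : Int)))) i j := by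
          simp [pvPeek, List.getD_eq_getElem?_getD, List.getElem?_eq_getElem hi1,
            List.getElem?_eq_getElem hj1]
        obtain ⟨hv1, hv2⟩ := hval i j hiH hjW
        have hmem := pvMem_writes (h := (H : Int)) (w := (W : Int)) (t := thickness)
          (by exact_mod_cast hH0) (by positivity) (by exact_mod_cast h2t) (by exact_mod_cast w2t)
          (i := i) (j := j) (by exact_mod_cast hiH) (by exact_mod_cast hjW)
        rw [hA]
        simp only [List.getElem_map, PySem.List.getElem_pyRange_one, zero_add]
        by_cases hp : (∃ p ∈ pvWrites (H : Int) (W : Int) thickness, p.1.toNat = i ∧ p.2.toNat = j)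
        · rw [hv1 (Or.inr hp), if_pos (hmem.1 hp)]
          simp [pvGet2, pvPeek, PySem.List.pyGetD_of_nonneg _ _ (Int.natCast_nonneg i),
            PySem.List.pyGetD_of_nonneg _ _ (Int.natCast_nonneg j)]
        · rw [hv2 (fun hq => hq.elim id hp), if_neg]
          intro hq
          exact hp (hmem.2 hq)
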